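-- pv_equiv track=rewrite | github.com/i-m-anshu-patel/Hackerrank_problems | palindrome_inside_a_string2.py | special_string
-- ===== SOURCE A (Python) =====
-- def palin(x):
--     if x==x[::-1]:
--         if len(set(x))==1 or len(set(x))==2:
--             return True
--         else:
--             return False
--     else:
--         return False
--
-- def special_string(string):
--     result=[]
--     for i in range(len(string)):
--         for j in range(i+1, len(string)+1):
--             r= string[i:j]
--             if palin(r):
--                 result.append(r)
--     return len(result)
-- ===== SOURCE B (Python) =====
-- def _expand(s, l, r):
--     seen = set()
--     cnt = 0
--     while l >= 0 and r < len(s) and s[l] == s[r]: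
--         seen.add(s[l])
--         if len(seen) > 2:
--             break
--         cnt += 1
--         l -= 1
--         r += 1
--     return cnt
--
--
-- def special_string(string):
--     total = 0
--     for c in range(len(string)):
--         total += _expand(string, c, c)
--         total += _expand(string, c, c + 1)
--     return total
-- ===== Notes on version B (the rewrite author's own statement) =====
-- stated objective: faster
-- what changed: A materialises every substring and tests each one for palindromicity and distinct-character count (cubic); B expands around each of the 2n centers, maintaining the seen-character set incrementally and stopping as soon as the palindrome breaks or a third distinct character appears (quadratic worst case, near-linear on typical text).
import Mathlib
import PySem

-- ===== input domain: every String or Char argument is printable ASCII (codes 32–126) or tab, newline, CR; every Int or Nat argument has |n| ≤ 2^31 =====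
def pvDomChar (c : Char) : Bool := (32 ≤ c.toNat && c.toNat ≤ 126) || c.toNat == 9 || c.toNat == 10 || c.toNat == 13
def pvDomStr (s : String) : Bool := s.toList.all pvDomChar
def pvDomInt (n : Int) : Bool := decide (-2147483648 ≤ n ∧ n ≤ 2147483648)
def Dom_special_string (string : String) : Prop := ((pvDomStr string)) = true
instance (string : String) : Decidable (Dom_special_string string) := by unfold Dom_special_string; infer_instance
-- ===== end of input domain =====

-- B replaces A's cubic scan of all substrings by an expand-around-center pass that
-- stops as soon as a center's palindrome breaks or exceeds two distinct characters (objective: faster).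


-- ===== PORT A =====
-- helper 'palin': x == x[::-1] and len(set(x)) in {1, 2}
def pvPalin (x : List Char) : Bool :=
  if some x == PySem.List.slice? x none none (-1) then
    if PySem.Set.len (PySem.Set.ofList x) == (1 : Int) || PySem.Set.len (PySem.Set.ofList x) == (2 : Int) then
      true
    else
      false
  else
    false

def special_string (string : String) : Int :=
  let s := string.toList
  let result : List (List Char) :=
    (PySem.List.pyRange 0 (PySem.List.len s) 1).foldl (fun result i =>
      (PySem.List.pyRange (i + 1) (PySem.List.len s + 1) 1).foldl (fun result j =>
        let r := PySem.List.slice s (some i) (some j)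
        if pvPalin r then result ++ [r] else result) result) []
  PySem.List.len result

-- ===== PORT B =====
-- helper '_expand': while l >= 0 and r < len(s) and s[l] == s[r]: …
def pvExpand (s : List Char) (l r : Int) (seen : PySem.Set Char) (cnt : Int) : Int :=
  if h : 0 ≤ l ∧ r < PySem.List.len s ∧ PySem.List.pyGetD s l ' ' = PySem.List.pyGetD s r ' ' then
    let seen' := PySem.Set.add seen (PySem.List.pyGetD s l ' ')
    if 2 < PySem.Set.len seen' then cnt
    else pvExpand s (l - 1) (r + 1) seen' (cnt + 1)
  else cnt
termination_by (PySem.List.len s - r).toNat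
decreasing_by
  simp only [PySem.List.len_eq] at *
  omega

def special_string_alt (string : String) : Int :=
  let s := string.toList
  (PySem.List.pyRange 0 (PySem.List.len s) 1).foldl
    (fun total c =>
      total + pvExpand s c c PySem.Set.empty 0 + pvExpand s c (c + 1) PySem.Set.empty 0) 0

-- ===== PRECONDITION & SPEC =====
def Spec_special_string (string : String) (out : Int) : Prop := out = special_string_alt string
instance (string : String) (out : Int) : Decidable (Spec_special_string string out) := by unfold Spec_special_string; infer_instance

-- ===== CLAIM (what is proved, stated in full; the proofs are below) =====
def Claim_equal_special_string : Prop := ∀ (string : String), Dom_special_string string → Spec_special_string string (special_string string)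


-- ===== LEMMAS AND PROOFS =====

-- the substring s[i:j] for Nat bounds
def pvSub (s : List Char) (i j : Nat) : List Char := (s.drop i).take (j - i)

-- the counted predicate at center c, radius k, width offset d (d = 1 odd, d = 2 even)
def pvR (s : List Char) (d c k : Nat) : Bool :=
  decide (k ≤ c) && decide (c + k + d ≤ s.length) && pvPalin (pvSub s (c - k) (c + k + d))

theorem pvPalin_iff (x : List Char) :
    pvPalin x = true ↔
      x.reverse = x ∧
        ((PySem.Set.ofList x).length = 1 ∨ (PySem.Set.ofList x).length = 2) := by
  unfold pvPalin
  rw [PySem.List.slice?_none_none_neg_one]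
  simp only [PySem.Set.len_eq, beq_iff_eq, Option.some.injEq, Bool.or_eq_true]
  have hc : ((List.length (PySem.Set.ofList x) : Int) = 1 ∨ (List.length (PySem.Set.ofList x) : Int) = 2)
      ↔ (List.length (PySem.Set.ofList x) = 1 ∨ List.length (PySem.Set.ofList x) = 2) := by
    omega
  constructor
  · intro h
    split_ifs at h with h1 h2
    exact ⟨h1.symm, hc.mp (by exact_mod_cast h2)⟩
  · rintro ⟨h1, h2⟩
    rw [if_pos h1.symm, if_pos (by exact_mod_cast hc.mpr h2)]

theorem pvSub_step (s : List Char) (d c k : Nat) (hd : 1 ≤ d) (hk : k + 1 ≤ c)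
    (hn : c + (k + 1) + d ≤ s.length) :
    pvSub s (c - (k + 1)) (c + (k + 1) + d) =
      s.getD (c - (k + 1)) ' ' :: pvSub s (c - k) (c + k + d) ++ [s.getD (c + k + d) ' '] := by
  unfold pvSub
  have h1 : c - (k + 1) < s.length := by omega
  have hdrop : s.drop (c - (k + 1)) = s[c - (k + 1)] :: s.drop (c - k) := by
    rw [List.drop_eq_getElem_cons h1]
    have h5 : c - (k + 1) + 1 = c - k := by omega
    rw [h5]
  rw [hdrop]
  have h2 : c + (k + 1) + d - (c - (k + 1)) = (2 * k + d + 1) + 1 := by omega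
  rw [h2, List.take_succ_cons]
  have h3 : 2 * k + d + 1 = (c + k + d - (c - k)) + 1 := by omega
  rw [h3, List.take_add_one]
  have h4 : (s.drop (c - k))[c + k + d - (c - k)]? = some (s.getD (c + k + d) ' ') := by
    rw [List.getElem?_drop]
    have h6 : c - k + (c + k + d - (c - k)) = c + k + d := by omega
    rw [h6, List.getElem?_eq_getElem (by omega), List.getD_eq_getElem _ _ (by omega)]
  rw [h4]
  simp [List.getD_eq_getElem?_getD, List.getElem?_eq_getElem h1]

theorem pal_step_iff (a b : Char) (m : List Char) :
    (a :: m ++ [b]).reverse = a :: m ++ [b] ↔ a = b ∧ m.reverse = m := by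
  rw [show (a :: m ++ [b]) = a :: (m ++ [b]) from rfl]
  rw [List.reverse_cons, List.reverse_append]
  simp only [List.reverse_cons, List.reverse_nil, List.nil_append, List.cons_append,
    List.cons.injEq]
  constructor
  · rintro ⟨rfl, h⟩
    exact ⟨rfl, List.append_inj_left' h (by simp)⟩
  · rintro ⟨rfl, h⟩
    rw [h]
    exact ⟨rfl, rfl⟩

theorem ofList_length_le {u v : List Char} (h : u ⊆ v) :
    (PySem.Set.ofList u).length ≤ (PySem.Set.ofList v).length := by
  apply List.Subperm.length_le
  apply (PySem.Set.nodup_ofList u).subperm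
  intro x hx
  rw [PySem.Set.mem_ofList] at hx
  rw [PySem.Set.mem_ofList]
  exact h hx

theorem ofList_length_eq {u v : List Char} (h : ∀ x, x ∈ u ↔ x ∈ v) :
    (PySem.Set.ofList u).length = (PySem.Set.ofList v).length := by
  apply List.Perm.length_eq
  rw [List.perm_ext_iff_of_nodup (PySem.Set.nodup_ofList u) (PySem.Set.nodup_ofList v)]
  intro a
  rw [PySem.Set.mem_ofList, PySem.Set.mem_ofList]
  exact h a

theorem sub_ne_nil (s : List Char) (i j : Nat) (hij : i < j) (hj : j ≤ s.length) :
    pvSub s i j ≠ [] := by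
  unfold pvSub
  have h : ((s.drop i).take (j - i)).length = j - i := by
    rw [List.length_take, List.length_drop]
    omega
  intro hn
  rw [hn] at h
  simp at h
  omega

theorem ofList_one_le {u : List Char} (h : u ≠ []) :
    1 ≤ (PySem.Set.ofList u).length := by
  rcases List.exists_mem_of_ne_nil _ h with ⟨y, hy⟩
  have : y ∈ PySem.Set.ofList u := by
    rw [PySem.Set.mem_ofList]; exact hy
  exact List.length_pos_of_mem this

theorem pvR_down (s : List Char) (d c k : Nat) (hd : 1 ≤ d) (h : pvR s d c (k + 1) = true) :
    pvR s d c k = true := by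
  unfold pvR at *
  simp only [Bool.and_eq_true, decide_eq_true_eq] at *
  obtain ⟨⟨hk, hn⟩, hp⟩ := h
  refine ⟨⟨by omega, by omega⟩, ?_⟩
  rw [pvPalin_iff] at hp ⊢
  rw [pvSub_step s d c k hd hk hn] at hp
  obtain ⟨hrev', hlen⟩ := hp
  rw [pal_step_iff] at hrev'
  obtain ⟨hab, hrev⟩ := hrev'
  refine ⟨hrev, ?_⟩
  have hsub : pvSub s (c - k) (c + k + d) ⊆
      s.getD (c - (k + 1)) ' ' :: pvSub s (c - k) (c + k + d) ++ [s.getD (c + k + d) ' '] := by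
    intro x hx
    simp [hx]
  have hle := ofList_length_le hsub
  have hge := ofList_one_le (sub_ne_nil s (c - k) (c + k + d) (by omega) (by omega))
  omega

theorem pvR_le_of (s : List Char) (d c : Nat) (hd : 1 ≤ d) (j : Nat) :
    ∀ t, pvR s d c (t + j) = true → pvR s d c t = true := by
  induction j with
  | zero => intro t h; simpa using h
  | succ n ih =>
    intro t h
    exact ih t (pvR_down s d c (t + n) hd (by rw [show t + n + 1 = t + (n + 1) by omega]; exact h))

theorem pvR_false_above (s : List Char) (d c : Nat) (hd : 1 ≤ d) {t : Nat}
    (ht : pvR s d c t = false) : ∀ k, t ≤ k → pvR s d c k = false := by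
  intro k hk
  by_contra hc
  have h1 : pvR s d c k = true := Bool.of_not_eq_false hc
  have h2 : pvR s d c t = true := by
    have := pvR_le_of s d c hd (k - t) t
    rw [show t + (k - t) = k by omega] at this
    exact this h1
  rw [ht] at h2
  cases h2

theorem countP_range_lt (m t : Nat) :
    (List.range m).countP (fun k => decide (k < t)) = min t m := by
  induction m with
  | zero => simp
  | succ n ih =>
    rw [List.range_succ, List.countP_append, ih]
    by_cases h : n < t
    · simp [h]; omega
    · simp [h]; omega

theorem countP_range_eq (m t : Nat) (p : Nat → Bool) (h1 : t ≤ m)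
    (h2 : ∀ k, k < t → p k = true) (h3 : ∀ k, t ≤ k → p k = false) :
    (List.range m).countP p = t := by
  have h : (List.range m).countP p = (List.range m).countP (fun k => decide (k < t)) := by
    apply List.countP_congr
    intro k _
    rcases Nat.lt_or_ge k t with h | h
    · simp [h2 k h, h]
    · simp [h3 k h, Nat.not_lt.mpr h]
  rw [h, countP_range_lt]
  omega

theorem pvSub_length (s : List Char) (i j : Nat) (hj : j ≤ s.length) (hij : i ≤ j) :
    (pvSub s i j).length = j - i := by
  unfold pvSub
  rw [List.length_take, List.length_drop]
  omega

theorem pvSub_getElem (s : List Char) (i j p : Nat) (hj : j ≤ s.length)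
    (hp : p < j - i) (h' : i + p < s.length) :
    (pvSub s i j)[p]'(by rw [pvSub_length s i j hj (by omega)]; omega) = s[i + p] := by
  unfold pvSub
  rw [List.getElem_take, List.getElem_drop]

theorem pvSub_one (s : List Char) (i : Nat) (hi : i < s.length) :
    pvSub s i (i + 1) = [s.getD i ' '] := by
  unfold pvSub
  rw [show i + 1 - i = 1 from by omega, List.drop_eq_getElem_cons hi,
    List.getD_eq_getElem _ _ hi]
  rfl

theorem pvSub_two (s : List Char) (i : Nat) (hi : i + 1 < s.length) :
    pvSub s i (i + 2) = [s.getD i ' ', s.getD (i + 1) ' '] := by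
  unfold pvSub
  rw [show i + 2 - i = 2 from by omega, List.drop_eq_getElem_cons (by omega : i < s.length),
    List.drop_eq_getElem_cons hi, List.getD_eq_getElem _ _ hi,
    List.getD_eq_getElem _ _ (by omega : i < s.length)]
  rfl

theorem pvSub_pal_of_matched (s : List Char) (d c t : Nat) (hd : d = 1 ∨ d = 2) (ht : t ≤ c)
    (hn : c + t + d ≤ s.length)
    (hm : ∀ u, u ≤ t → s.getD (c - u) ' ' = s.getD (c + d - 1 + u) ' ') :
    (pvSub s (c - t) (c + t + d)).reverse = pvSub s (c - t) (c + t + d) := by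
  induction t with
  | zero =>
    rcases hd with rfl | rfl
    · rw [Nat.sub_zero, show c + 0 + 1 = c + 1 by omega, pvSub_one s c (by omega)]
      rfl
    · rw [Nat.sub_zero, show c + 0 + 2 = c + 2 by omega, pvSub_two s c (by omega)]
      have h0 := hm 0 (by omega)
      simp only [Nat.sub_zero, show c + 2 - 1 + 0 = c + 1 by omega] at h0
      rw [h0]
      rfl
  | succ n ih =>
    rw [pvSub_step s d c n (by omega) (by omega) (by omega), pal_step_iff]
    constructor
    · have h := hm (n + 1) (by omega)
      rw [show c + d - 1 + (n + 1) = c + n + d by omega] at h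
      exact h
    · exact ih (by omega) (by omega) (fun u hu => hm u (by omega))

theorem pvSub_mem_iff (s : List Char) (d c t : Nat) (hd : d = 1 ∨ d = 2) (ht : t ≤ c)
    (hn : c + t + d ≤ s.length)
    (hm : ∀ u, u ≤ t → s.getD (c - u) ' ' = s.getD (c + d - 1 + u) ' ') (x : Char) :
    x ∈ pvSub s (c - t) (c + t + d) ↔ ∃ u, u ≤ t ∧ x = s.getD (c - u) ' ' := by
  have hd12 : 1 ≤ d ∧ d ≤ 2 := by rcases hd with rfl | rfl <;> omega
  have hlen : (pvSub s (c - t) (c + t + d)).length = 2 * t + d := by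
    rw [pvSub_length s _ _ (by omega) (by omega)]
    omega
  rw [List.mem_iff_getElem]
  constructor
  · rintro ⟨p, hp, hx⟩
    rw [hlen] at hp
    rw [pvSub_getElem s _ _ p (by omega) (by omega) (by omega)] at hx
    rcases Nat.lt_or_ge p (t + 1) with h | h
    · refine ⟨t - p, by omega, ?_⟩
      rw [← hx, List.getD_eq_getElem _ _ (by omega)]
      congr 1
      omega
    · -- right arm: position c - t + p = c + d - 1 + u with u = p - t - d + 1
      refine ⟨p - t + 1 - d, by omega, ?_⟩
      rw [hm (p - t + 1 - d) (by omega), ← hx, List.getD_eq_getElem _ _ (by omega)]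
      congr 1
      omega
  · rintro ⟨u, hu, hx⟩
    refine ⟨t - u, by rw [hlen]; omega, ?_⟩
    rw [pvSub_getElem s _ _ _ (by omega) (by omega) (by omega), hx,
      List.getD_eq_getElem _ _ (by omega)]
    congr 1
    omega

theorem ofList_snoc (xs : List Char) (x : Char) :
    PySem.Set.ofList (xs ++ [x]) = PySem.Set.add (PySem.Set.ofList xs) x := by
  rw [PySem.Set.ofList_eq_foldl, PySem.Set.ofList_eq_foldl, List.foldl_append]
  rfl

theorem pvSub_ends (s : List Char) (i j : Nat) (hij : i < j) (hj : j ≤ s.length)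
    (hrev : (pvSub s i j).reverse = pvSub s i j) :
    s.getD i ' ' = s.getD (j - 1) ' ' := by
  have hlen : (pvSub s i j).length = j - i := pvSub_length s i j hj (by omega)
  have h0 : (pvSub s i j).head? = some (s[i]'(by omega)) := by
    rw [List.head?_eq_getElem?, List.getElem?_eq_getElem (by omega)]
    have := pvSub_getElem s i j 0 hj (by omega) (by omega)
    simp only [Nat.add_zero] at this
    rw [this]
  have h1 : (pvSub s i j).getLast? = some (s[j - 1]'(by omega)) := by
    rw [List.getLast?_eq_getElem?, List.getElem?_eq_getElem (by rw [hlen]; omega)]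
    have hgg := pvSub_getElem s i j (j - i - 1) hj (by omega) (by omega)
    simp only [show i + (j - i - 1) = j - 1 from by omega] at hgg
    congr 1
    simp only [hlen]
    rw [hgg]
  have h2 := List.head?_reverse (l := pvSub s i j)
  rw [hrev, h0, h1] at h2
  rw [List.getD_eq_getElem _ _ (by omega : i < s.length),
    List.getD_eq_getElem _ _ (by omega : j - 1 < s.length)]
  exact Option.some.inj h2

theorem pvExpand_eq (s : List Char) (d c : Nat) (hd : d = 1 ∨ d = 2) :
    ∀ fuel t, t ≤ c + 1 → fuel = c + 1 - t →
    (∀ u, u < t → s.getD (c - u) ' ' = s.getD (c + d - 1 + u) ' ') →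
    (∀ k, k < t → pvR s d c k = true) →
    pvExpand s ((c : Int) - (t : Int)) ((c : Int) + (d : Int) - 1 + (t : Int))
        (PySem.Set.ofList ((List.range t).map (fun u => s.getD (c - u) ' '))) (t : Int)
      = ((List.range (c + 1)).countP (pvR s d c) : Int) := by
  have hd1 : 1 ≤ d := by rcases hd with rfl | rfl <;> omega
  have hd2 : d ≤ 2 := by rcases hd with rfl | rfl <;> omega
  intro fuel
  induction fuel with
  | zero =>
    intro t ht hfuel hm hR
    have ht' : t = c + 1 := by omega
    subst ht'
    rw [pvExpand, dif_neg (by push_cast; omega)]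
    have : (List.range (c + 1)).countP (pvR s d c) = c + 1 := by
      apply countP_range_eq _ _ _ (by omega) hR
      intro k hk
      simp only [pvR, Bool.and_eq_false_iff, decide_eq_false_iff_not]
      left; left; omega
    rw [this]
  | succ fuel ih =>
    intro t ht hfuel hm hR
    have htc : t ≤ c := by omega
    have e1 : (c : Int) - (t : Int) = ((c - t : Nat) : Int) := by omega
    have e2 : (c : Int) + (d : Int) - 1 + (t : Int) = ((c + d - 1 + t : Nat) : Int) := by omega
    rw [e1, e2, pvExpand]
    simp only [PySem.List.pyGetD_natCast, PySem.List.len_eq]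
    by_cases hbound : c + d - 1 + t < s.length
    · by_cases hchar : s.getD (c - t) ' ' = s.getD (c + d - 1 + t) ' '
      · rw [dif_pos ⟨by positivity, by exact_mod_cast hbound, hchar⟩]
        have hm' : ∀ u, u < t + 1 → s.getD (c - u) ' ' = s.getD (c + d - 1 + u) ' ' := by
          intro u hu
          rcases Nat.lt_or_ge u t with h | h
          · exact hm u h
          · have : u = t := by omega
            subst this; exact hchar
        have hm'' : ∀ u, u ≤ t → s.getD (c - u) ' ' = s.getD (c + d - 1 + u) ' ' :=
          fun u hu => hm' u (by omega)
        have hseen : PySem.Set.add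
              (PySem.Set.ofList ((List.range t).map (fun u => s.getD (c - u) ' ')))
              (s.getD (c - t) ' ')
            = PySem.Set.ofList ((List.range (t + 1)).map (fun u => s.getD (c - u) ' ')) := by
          have hsplit : (List.range (t + 1)).map (fun u => s.getD (c - u) ' ')
              = (List.range t).map (fun u => s.getD (c - u) ' ') ++ [s.getD (c - t) ' '] := by
            rw [List.range_succ]
            simp
          rw [hsplit, ofList_snoc]
        have hWlen : (PySem.Set.ofList ((List.range (t + 1)).map (fun u => s.getD (c - u) ' '))).length
            = (PySem.Set.ofList (pvSub s (c - t) (c + t + d))).length := by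
          apply ofList_length_eq
          intro x
          rw [pvSub_mem_iff s d c t hd htc (by omega) hm'' x]
          simp only [List.mem_map, List.mem_range]
          constructor
          · rintro ⟨u, hu, hx⟩; exact ⟨u, by omega, hx.symm⟩
          · rintro ⟨u, hu, hx⟩; exact ⟨u, by omega, hx.symm⟩
        rw [hseen]
        by_cases hbig : 2 < PySem.Set.len
            (PySem.Set.ofList ((List.range (t + 1)).map (fun u => s.getD (c - u) ' ')))
        · rw [if_pos hbig]
          have hR_t : pvR s d c t = false := by
            rw [PySem.Set.len_eq, hWlen] at hbig
            simp only [pvR, Bool.and_eq_false_iff]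
            right
            rw [Bool.eq_false_iff]
            intro hpal
            rw [pvPalin_iff] at hpal
            omega
          have : (List.range (c + 1)).countP (pvR s d c) = t :=
            countP_range_eq _ _ _ (by omega) hR (pvR_false_above s d c hd1 hR_t)
          rw [this]
        · rw [if_neg hbig]
          have hR_t : pvR s d c t = true := by
            rw [PySem.Set.len_eq, hWlen] at hbig
            simp only [pvR, Bool.and_eq_true, decide_eq_true_eq]
            refine ⟨⟨htc, by omega⟩, ?_⟩
            rw [pvPalin_iff]
            refine ⟨pvSub_pal_of_matched s d c t hd htc (by omega) hm'', ?_⟩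
            have := ofList_one_le (sub_ne_nil s (c - t) (c + t + d) (by omega) (by omega))
            omega
          have e3 : ((c - t : Nat) : Int) - 1 = (c : Int) - ((t + 1 : Nat) : Int) := by omega
          have e4 : ((c + d - 1 + t : Nat) : Int) + 1 = (c : Int) + (d : Int) - 1 + ((t + 1 : Nat) : Int) := by omega
          have e5 : ((t : Nat) : Int) + 1 = ((t + 1 : Nat) : Int) := by omega
          rw [e3, e4, e5]
          exact ih (t + 1) (by omega) (by omega) hm'
            (fun k hk => by
              rcases Nat.lt_or_ge k t with h | h
              · exact hR k h
              · have : k = t := by omega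
                subst this; exact hR_t)
      · rw [dif_neg (by
          rintro ⟨-, -, heq⟩
          exact hchar heq)]
        have hR_t : pvR s d c t = false := by
          simp only [pvR, Bool.and_eq_false_iff]
          right
          rw [Bool.eq_false_iff]
          intro hpal
          rw [pvPalin_iff] at hpal
          have := pvSub_ends s (c - t) (c + t + d) (by omega) (by omega) hpal.1
          rw [show c + t + d - 1 = c + d - 1 + t by omega] at this
          exact hchar this
        have : (List.range (c + 1)).countP (pvR s d c) = t :=
          countP_range_eq _ _ _ (by omega) hR (pvR_false_above s d c hd1 hR_t)
        rw [this]
    · rw [dif_neg (by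
        rintro ⟨-, hlt, -⟩
        exact hbound (by exact_mod_cast hlt))]
      have hR_t : pvR s d c t = false := by
        simp only [pvR, Bool.and_eq_false_iff, decide_eq_false_iff_not]
        left; right; omega
      have : (List.range (c + 1)).countP (pvR s d c) = t :=
        countP_range_eq _ _ _ (by omega) hR (pvR_false_above s d c hd1 hR_t)
      rw [this]

theorem pvExpand_start (s : List Char) (d c : Nat) (hd : d = 1 ∨ d = 2) (hc : c < s.length) :
    pvExpand s (c : Int) ((c : Int) + (d : Int) - 1) PySem.Set.empty 0
      = ((List.range (c + 1)).countP (pvR s d c) : Int) := by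
  have h := pvExpand_eq s d c hd (c + 1) 0 (by omega) (by omega)
    (by intro u hu; omega) (by intro k hk; omega)
  simp only [Nat.cast_zero, List.range_zero, List.map_nil, sub_zero, add_zero] at h
  exact h

theorem alt_eq_sum (string : String) :
    special_string_alt string =
      (((List.range string.toList.length).map (fun c =>
          (List.range (c + 1)).countP (pvR string.toList 1 c) +
          (List.range (c + 1)).countP (pvR string.toList 2 c))).sum : Nat) := by
  unfold special_string_alt
  simp only [PySem.List.len_eq, PySem.List.pyRange_zero_nat, List.foldl_map]
  set s := string.toList with hs
  have step1 : (List.range s.length).foldl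
      (fun (x : Int) (y : Nat) => x + pvExpand s (↑y) (↑y) PySem.Set.empty 0 +
        pvExpand s (↑y) (↑y + 1) PySem.Set.empty 0) 0
      = (List.range s.length).foldl
      (fun (x : Int) (y : Nat) => x + (((List.range (y + 1)).countP (pvR s 1 y) +
          (List.range (y + 1)).countP (pvR s 2 y) : Nat) : Int)) 0 := by
    apply PySem.List.foldl_congr_mem
    intro acc k hk
    rw [List.mem_range] at hk
    have h1 : pvExpand s (↑k) (↑k) PySem.Set.empty 0
        = ((List.range (k + 1)).countP (pvR s 1 k) : Int) := by
      have h := pvExpand_start s 1 k (Or.inl rfl) hk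
      rw [show (k : Int) + ((1 : Nat) : Int) - 1 = (k : Int) by push_cast; ring] at h
      exact h
    have h2 : pvExpand s (↑k) (↑k + 1) PySem.Set.empty 0
        = ((List.range (k + 1)).countP (pvR s 2 k) : Int) := by
      have h := pvExpand_start s 2 k (Or.inr rfl) hk
      rw [show (k : Int) + ((2 : Nat) : Int) - 1 = (k : Int) + 1 by push_cast; ring] at h
      exact h
    rw [h1, h2]
    push_cast
    ring
  rw [step1, PySem.List.foldl_add (g := fun (y : Nat) => (((List.range (y + 1)).countP (pvR s 1 y) +
      (List.range (y + 1)).countP (pvR s 2 y) : Nat) : Int))]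
  rw [Nat.cast_list_sum, List.map_map]
  simp only [Function.comp_def, zero_add]

theorem a_eq_sum (string : String) :
    special_string string =
      (((List.range string.toList.length).map (fun i =>
          (List.range (string.toList.length - i)).countP
            (fun m => pvPalin (pvSub string.toList i (i + 1 + m))))).sum : Nat) := by
  unfold special_string
  simp only [PySem.List.len_eq, PySem.List.foldl_append_if, PySem.List.foldl_append_eq_flatMap,
    List.nil_append]
  set s := string.toList with hs
  rw [PySem.List.pyRange_zero_nat]
  norm_cast
  rw [List.length_flatMap, List.map_map]
  apply congrArg
  apply List.map_congr_left
  intro k hk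
  rw [List.mem_range] at hk
  simp only [Function.comp_apply, List.length_map, ← List.countP_eq_length_filter]
  rw [PySem.List.pyRange_one]
  rw [show (((s.length + 1 : Nat) : Int) - ((k : Int) + 1)).toNat = s.length - k from by omega]
  rw [List.countP_map]
  apply List.countP_congr
  intro m hm
  rw [List.mem_range] at hm
  simp only [Function.comp_apply]
  rw [show ((k : Int) + 1 + (m : Int)) = ((k + 1 + m : Nat) : Int) from by push_cast; ring,
    PySem.List.slice_natCast]
  rfl

theorem countP_eq_card (M : Nat) (p : Nat → Bool) :
    (List.range M).countP p = ((Finset.range M).filter (fun x => p x = true)).card := by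
  induction M with
  | zero => simp
  | succ n ih =>
    rw [List.range_succ, List.countP_append, ih, Finset.range_add_one, Finset.filter_insert]
    by_cases h : p n = true
    · rw [if_pos h, Finset.card_insert_of_notMem (by simp)]
      simp [h]
    · rw [if_neg h]
      simp [h]

theorem countP_to_sum (M : Nat) (p : Nat → Bool) :
    (List.range M).countP p = ∑ m ∈ Finset.range M, if p m = true then 1 else 0 := by
  rw [countP_eq_card, Finset.card_filter]

theorem list_sum_range (f : Nat → Nat) (n : Nat) :
    ((List.range n).map f).sum = ∑ i ∈ Finset.range n, f i := by
  induction n with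
  | zero => simp
  | succ m ih => simp [List.range_succ, Finset.sum_range_succ, ih]

theorem recount (s : List Char) :
    ((List.range s.length).map (fun i =>
        (List.range (s.length - i)).countP (fun m => pvPalin (pvSub s i (i + 1 + m))))).sum =
      ((List.range s.length).map (fun c =>
          (List.range (c + 1)).countP (pvR s 1 c) +
          (List.range (c + 1)).countP (pvR s 2 c))).sum := by
  set n := s.length with hn
  set q : Nat → Nat → Bool := fun i m => pvPalin (pvSub s i (i + 1 + m)) with hq
  -- A side as a sum over a fixed square
  have hA : ((List.range n).map (fun i =>
      (List.range (n - i)).countP (fun m => q i m))).sum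
      = ∑ p ∈ Finset.range n ×ˢ Finset.range n,
          (if p.1 + p.2 + 1 ≤ n ∧ q p.1 p.2 = true then 1 else 0) := by
    rw [list_sum_range]
    have hprod : ∑ p ∈ Finset.range n ×ˢ Finset.range n,
        (if p.1 + p.2 + 1 ≤ n ∧ q p.1 p.2 = true then (1 : Nat) else 0)
        = ∑ i ∈ Finset.range n, ∑ m ∈ Finset.range n,
            (if i + m + 1 ≤ n ∧ q i m = true then 1 else 0) := Finset.sum_product _ _ _
    rw [hprod]
    apply Finset.sum_congr rfl
    intro i hi
    rw [Finset.mem_range] at hi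
    rw [countP_to_sum]
    have hsub : Finset.range (n - i) ⊆ Finset.range n := by
      intro x hx
      simp only [Finset.mem_range] at hx ⊢
      omega
    have hzero : ∀ m ∈ Finset.range n, m ∉ Finset.range (n - i) →
        (if i + m + 1 ≤ n ∧ q i m = true then (1 : Nat) else 0) = 0 := by
      intro m hm hnotm
      simp only [Finset.mem_range] at hm hnotm
      have hb : ¬(i + m + 1 ≤ n) := by omega
      simp [hb]
    rw [← Finset.sum_subset hsub hzero]
    apply Finset.sum_congr rfl
    intro m hm
    rw [Finset.mem_range] at hm
    have hb : i + m + 1 ≤ n := by omega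
    simp [hb]
  -- B side as sums over the same square
  have hBd : ∀ d, 1 ≤ d → ((List.range n).map (fun c =>
      (List.range (c + 1)).countP (pvR s d c))).sum
      = ∑ p ∈ Finset.range n ×ˢ Finset.range n,
          (if pvR s d p.1 p.2 = true then 1 else 0) := by
    intro d hd
    rw [list_sum_range]
    have hprod : ∑ p ∈ Finset.range n ×ˢ Finset.range n,
        (if pvR s d p.1 p.2 = true then (1 : Nat) else 0)
        = ∑ c ∈ Finset.range n, ∑ k ∈ Finset.range n,
            (if pvR s d c k = true then 1 else 0) := Finset.sum_product _ _ _
    rw [hprod]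
    apply Finset.sum_congr rfl
    intro c hc
    rw [Finset.mem_range] at hc
    rw [countP_to_sum]
    have hsub : Finset.range (c + 1) ⊆ Finset.range n := by
      intro x hx
      simp only [Finset.mem_range] at hx ⊢
      omega
    have hzero : ∀ m ∈ Finset.range n, m ∉ Finset.range (c + 1) →
        (if pvR s d c m = true then (1 : Nat) else 0) = 0 := by
      intro m hm hnotm
      simp only [Finset.mem_range] at hm hnotm
      have hfalse : pvR s d c m = false := by
        simp only [pvR, Bool.and_eq_false_iff, decide_eq_false_iff_not]
        left; left; omega
      simp [hfalse]
    rw [← Finset.sum_subset hsub hzero]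
  -- split the A summand by parity of the inner offset
  have hsplit : ∀ p : Nat × Nat,
      (if p.1 + p.2 + 1 ≤ n ∧ q p.1 p.2 = true then (1 : Nat) else 0)
      = (if p.1 + p.2 + 1 ≤ n ∧ q p.1 p.2 = true ∧ p.2 % 2 = 0 then 1 else 0)
        + (if p.1 + p.2 + 1 ≤ n ∧ q p.1 p.2 = true ∧ p.2 % 2 = 1 then 1 else 0) := by
    intro p
    by_cases h1 : p.1 + p.2 + 1 ≤ n ∧ q p.1 p.2 = true
    · rcases Nat.even_or_odd p.2 with h | h
      · have h2 : p.2 % 2 = 0 := Nat.even_iff.mp h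
        simp [h1.1, h1.2, h2]
      · have h2 : p.2 % 2 = 1 := Nat.odd_iff.mp h
        simp [h1.1, h1.2, h2]
    · rw [if_neg h1, if_neg (by tauto), if_neg (by tauto)]
  -- odd-length substrings are the d = 1 centers
  have hodd : ∑ p ∈ Finset.range n ×ˢ Finset.range n,
        (if p.1 + p.2 + 1 ≤ n ∧ q p.1 p.2 = true ∧ p.2 % 2 = 0 then (1 : Nat) else 0)
      = ∑ p ∈ Finset.range n ×ˢ Finset.range n,
          (if pvR s 1 p.1 p.2 = true then 1 else 0) := by
    rw [← Finset.card_filter, ← Finset.card_filter]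
    apply Finset.card_nbij' (fun p => (p.1 + p.2 / 2, p.2 / 2)) (fun p => (p.1 - p.2, 2 * p.2))
    · intro p hp
      simp only [Finset.coe_filter, Set.mem_setOf_eq, Finset.mem_product, Finset.mem_range] at hp ⊢
      obtain ⟨⟨hi, hm⟩, hbound, hqq, hpar⟩ := hp
      refine ⟨⟨by omega, by omega⟩, ?_⟩
      simp only [pvR, Bool.and_eq_true, decide_eq_true_eq]
      refine ⟨⟨by omega, by omega⟩, ?_⟩
      rw [show p.1 + p.2 / 2 - p.2 / 2 = p.1 by omega,
        show p.1 + p.2 / 2 + p.2 / 2 + 1 = p.1 + 1 + p.2 by omega]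
      exact hqq
    · intro p hp
      simp only [Finset.coe_filter, Set.mem_setOf_eq, Finset.mem_product, Finset.mem_range] at hp ⊢
      obtain ⟨⟨hc, hk⟩, hR⟩ := hp
      simp only [pvR, Bool.and_eq_true, decide_eq_true_eq] at hR
      obtain ⟨⟨hkc, hbd⟩, hpal⟩ := hR
      refine ⟨⟨by omega, by omega⟩, by omega, ?_, by omega⟩
      show pvPalin (pvSub s (p.1 - p.2) (p.1 - p.2 + 1 + 2 * p.2)) = true
      rw [show p.1 - p.2 + 1 + 2 * p.2 = p.1 + p.2 + 1 by omega]
      exact hpal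
    · intro p hp
      obtain ⟨p1, p2⟩ := p
      simp only [Finset.coe_filter, Set.mem_setOf_eq, Finset.mem_product, Finset.mem_range] at hp
      obtain ⟨⟨hi, hm⟩, hbound, hqq, hpar⟩ := hp
      simp only [Prod.mk.injEq]
      constructor <;> omega
    · intro p hp
      obtain ⟨p1, p2⟩ := p
      simp only [Finset.coe_filter, Set.mem_setOf_eq, Finset.mem_product, Finset.mem_range] at hp
      obtain ⟨⟨hc, hk⟩, hR⟩ := hp
      simp only [pvR, Bool.and_eq_true, decide_eq_true_eq] at hR
      obtain ⟨⟨hkc, hbd⟩, -⟩ := hR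
      simp only [Prod.mk.injEq]
      constructor <;> omega
  -- even-length substrings are the d = 2 centers
  have heven : ∑ p ∈ Finset.range n ×ˢ Finset.range n,
        (if p.1 + p.2 + 1 ≤ n ∧ q p.1 p.2 = true ∧ p.2 % 2 = 1 then (1 : Nat) else 0)
      = ∑ p ∈ Finset.range n ×ˢ Finset.range n,
          (if pvR s 2 p.1 p.2 = true then 1 else 0) := by
    rw [← Finset.card_filter, ← Finset.card_filter]
    apply Finset.card_nbij' (fun p => (p.1 + p.2 / 2, p.2 / 2)) (fun p => (p.1 - p.2, 2 * p.2 + 1))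
    · intro p hp
      simp only [Finset.coe_filter, Set.mem_setOf_eq, Finset.mem_product, Finset.mem_range] at hp ⊢
      obtain ⟨⟨hi, hm⟩, hbound, hqq, hpar⟩ := hp
      refine ⟨⟨by omega, by omega⟩, ?_⟩
      simp only [pvR, Bool.and_eq_true, decide_eq_true_eq]
      refine ⟨⟨by omega, by omega⟩, ?_⟩
      rw [show p.1 + p.2 / 2 - p.2 / 2 = p.1 by omega,
        show p.1 + p.2 / 2 + p.2 / 2 + 2 = p.1 + 1 + p.2 by omega]
      exact hqq
    · intro p hp
      simp only [Finset.coe_filter, Set.mem_setOf_eq, Finset.mem_product, Finset.mem_range] at hp ⊢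
      obtain ⟨⟨hc, hk⟩, hR⟩ := hp
      simp only [pvR, Bool.and_eq_true, decide_eq_true_eq] at hR
      obtain ⟨⟨hkc, hbd⟩, hpal⟩ := hR
      refine ⟨⟨by omega, by omega⟩, by omega, ?_, by omega⟩
      show pvPalin (pvSub s (p.1 - p.2) (p.1 - p.2 + 1 + (2 * p.2 + 1))) = true
      rw [show p.1 - p.2 + 1 + (2 * p.2 + 1) = p.1 + p.2 + 2 by omega]
      exact hpal
    · intro p hp
      obtain ⟨p1, p2⟩ := p
      simp only [Finset.coe_filter, Set.mem_setOf_eq, Finset.mem_product, Finset.mem_range] at hp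
      obtain ⟨⟨hi, hm⟩, hbound, hqq, hpar⟩ := hp
      simp only [Prod.mk.injEq]
      constructor <;> omega
    · intro p hp
      obtain ⟨p1, p2⟩ := p
      simp only [Finset.coe_filter, Set.mem_setOf_eq, Finset.mem_product, Finset.mem_range] at hp
      obtain ⟨⟨hc, hk⟩, hR⟩ := hp
      simp only [pvR, Bool.and_eq_true, decide_eq_true_eq] at hR
      obtain ⟨⟨hkc, hbd⟩, -⟩ := hR
      simp only [Prod.mk.injEq]
      constructor <;> omega
  -- assemble
  rw [hA]
  have hBsum : ((List.range n).map (fun c =>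
      (List.range (c + 1)).countP (pvR s 1 c) +
      (List.range (c + 1)).countP (pvR s 2 c))).sum
      = ((List.range n).map (fun c => (List.range (c + 1)).countP (pvR s 1 c))).sum
        + ((List.range n).map (fun c => (List.range (c + 1)).countP (pvR s 2 c))).sum := by
    rw [list_sum_range, list_sum_range, list_sum_range, ← Finset.sum_add_distrib]
  rw [hBsum, hBd 1 (by omega), hBd 2 (by omega), ← hodd, ← heven, ← Finset.sum_add_distrib]
  apply Finset.sum_congr rfl
  intro p hp
  exact hsplit p

-- ===== VERDICT (by name: the statement is the Claim_ definition above) =====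
theorem special_string_spec : Claim_equal_special_string := by
  intro string _
  unfold Spec_special_string
  rw [a_eq_sum, alt_eq_sum, recount]
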